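-- pv_equiv track=rewrite | github.com/drazen64/AdventOfCode2025 | Day03/Lobby.py | calcJoltage
-- ===== SOURCE A (Python) =====
-- def calcJoltage(batBank :str) -> int:
--     maxPos = 0
--     maxJoltage = 0
--     # nađi najveći
--     for i in range(len(batBank)-1):
--         if int(batBank[i]) > maxJoltage:
--             maxJoltage = int(batBank[i])
--             maxPos = i
--
--     secondMax = 0
--     for i in range(maxPos+1, len(batBank)):
--         if int(batBank[i]) > secondMax:
--             secondMax = int(batBank[i])
--
--     return maxJoltage*10 + secondMax
-- ===== SOURCE B (Python) =====
-- def calcJoltage(batBank: str) -> int: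
--     # single right-to-left pass: best of 10*d[i] + max(d[i+1:]) over all i
--     if len(batBank) < 2:
--         return 0
--     maxSuffix = int(batBank[-1])
--     best = 0
--     for i in range(len(batBank) - 2, -1, -1):
--         d = int(batBank[i])
--         cand = 10 * d + maxSuffix
--         if cand > best:
--             best = cand
--         if d > maxSuffix:
--             maxSuffix = d
--     return best
-- ===== Notes on version B (the rewrite author's own statement) =====
-- stated objective: alternative
-- what changed: A makes two left-to-right passes (find the leftmost max digit among all but the last char, then scan the rest for the runner-up); B makes one right-to-left pass maintaining the max suffix digit and the best pair value 10*d[i]+max(d[i+1:]).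
import Mathlib
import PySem

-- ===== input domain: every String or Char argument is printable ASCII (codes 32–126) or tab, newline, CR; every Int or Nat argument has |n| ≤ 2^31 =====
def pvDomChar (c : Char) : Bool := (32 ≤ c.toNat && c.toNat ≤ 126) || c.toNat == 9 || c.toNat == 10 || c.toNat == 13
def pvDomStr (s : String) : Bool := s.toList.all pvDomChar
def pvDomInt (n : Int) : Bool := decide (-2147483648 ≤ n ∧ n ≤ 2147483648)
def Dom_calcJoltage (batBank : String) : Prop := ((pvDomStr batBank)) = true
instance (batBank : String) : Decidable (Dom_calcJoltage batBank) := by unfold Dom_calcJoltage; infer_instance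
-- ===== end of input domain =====

-- B replaces A's two left-to-right passes (leftmost max digit, then runner-up after it) by one
-- right-to-left pass keeping the max suffix digit and the best pair value; same O(n) cost (objective: alternative).

-- ===== PORT A =====
-- int(c) for a one-char string; Pre_ excludes non-digit chars of a length ≥ 2 input, where Python raises ValueError
def pyDigit (c : Char) : Int := (PySem.Int.ofChars? [c]).getD 0

-- first loop: for i in range(len(batBank)-1), state (maxPos, maxJoltage)
def aLoop1 : List Char → Nat → Nat × Int → Nat × Int
  | [], _, st => st
  | c :: cs, i, (maxPos, maxJ) =>
      if pyDigit c > maxJ then aLoop1 cs (i + 1) (i, pyDigit c)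
      else aLoop1 cs (i + 1) (maxPos, maxJ)

-- second loop: for i in range(maxPos+1, len(batBank)), accumulator secondMax
def aLoop2 : List Char → Int → Int
  | [], m => m
  | c :: cs, m => if pyDigit c > m then aLoop2 cs (pyDigit c) else aLoop2 cs m

def calcJoltage (batBank : String) : Int :=
  let l := batBank.toList
  let st := aLoop1 (l.take (l.length - 1)) 0 (0, 0)
  let secondMax := aLoop2 (l.drop (st.1 + 1)) 0
  st.2 * 10 + secondMax

-- ===== PORT B =====
-- loop body of Source B: state (maxSuffix, best), one char d = int(batBank[i])
def bStep (st : Int × Int) (c : Char) : Int × Int :=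
  let d := pyDigit c
  let cand := 10 * d + st.1
  let best := if cand > st.2 then cand else st.2
  (if d > st.1 then d else st.1, best)

-- the right-to-left pass: maxSuffix starts at int(batBank[-1]), i runs n-2 .. 0
def bScan (l : List Char) : Int × Int :=
  match l.reverse with
  | [] => (0, 0)
  | last :: revRest => revRest.foldl bStep (pyDigit last, 0)

def calcJoltage_alt (batBank : String) : Int :=
  let l := batBank.toList
  if l.length < 2 then 0 else (bScan l).2

-- ===== PRECONDITION & SPEC =====
-- excludes exactly the inputs on which A raises ValueError: a string of length ≥ 2 containing a non-digit char
def Pre_calcJoltage (batBank : String) : Prop :=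
  batBank.toList.length < 2 ∨ batBank.toList.all Char.isDigit = true
instance (batBank : String) : Decidable (Pre_calcJoltage batBank) := by unfold Pre_calcJoltage; infer_instance
def pvWitness_calcJoltage : String := "2817"

def Spec_calcJoltage (batBank : String) (out : Int) : Prop := out = calcJoltage_alt batBank
instance (batBank : String) (out : Int) : Decidable (Spec_calcJoltage batBank out) := by unfold Spec_calcJoltage; infer_instance

-- ===== CLAIM (what is proved, stated in full; the proofs are below) =====
def Claim_equal_calcJoltage : Prop := ∀ (batBank : String), Dom_calcJoltage batBank → Pre_calcJoltage batBank → Spec_calcJoltage batBank (calcJoltage batBank)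

-- ===== LEMMAS AND PROOFS =====

theorem digit_enum (c : Char) (h : c.isDigit = true) :
    c = '0' ∨ c = '1' ∨ c = '2' ∨ c = '3' ∨ c = '4' ∨ c = '5' ∨ c = '6' ∨ c = '7' ∨ c = '8' ∨ c = '9' := by
  simp [Char.isDigit] at h
  have hv : 48 ≤ c.toNat ∧ c.toNat ≤ 57 := h
  have he : ∀ (d : Char), c.toNat = d.toNat → c = d := fun d hd => Char.ext (UInt32.toNat_inj.mp hd)
  have : c.toNat = 48 ∨ c.toNat = 49 ∨ c.toNat = 50 ∨ c.toNat = 51 ∨ c.toNat = 52 ∨ c.toNat = 53 ∨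
      c.toNat = 54 ∨ c.toNat = 55 ∨ c.toNat = 56 ∨ c.toNat = 57 := by omega
  rcases this with h|h|h|h|h|h|h|h|h|h
  · exact Or.inl (he '0' h)
  · exact Or.inr (Or.inl (he '1' h))
  · exact Or.inr (Or.inr (Or.inl (he '2' h)))
  · exact Or.inr (Or.inr (Or.inr (Or.inl (he '3' h))))
  · exact Or.inr (Or.inr (Or.inr (Or.inr (Or.inl (he '4' h)))))
  · exact Or.inr (Or.inr (Or.inr (Or.inr (Or.inr (Or.inl (he '5' h))))))
  · exact Or.inr (Or.inr (Or.inr (Or.inr (Or.inr (Or.inr (Or.inl (he '6' h)))))))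
  · exact Or.inr (Or.inr (Or.inr (Or.inr (Or.inr (Or.inr (Or.inr (Or.inl (he '7' h))))))))
  · exact Or.inr (Or.inr (Or.inr (Or.inr (Or.inr (Or.inr (Or.inr (Or.inr (Or.inl (he '8' h)))))))))
  · exact Or.inr (Or.inr (Or.inr (Or.inr (Or.inr (Or.inr (Or.inr (Or.inr (Or.inr (he '9' h)))))))))

theorem pyDigit_bounds (c : Char) (h : c.isDigit = true) : 0 ≤ pyDigit c ∧ pyDigit c ≤ 9 := by
  rcases digit_enum c h with h|h|h|h|h|h|h|h|h|h <;> subst h <;> decide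

-- running max of digits, seeded
def dmax (m : Int) (cs : List Char) : Int := cs.foldl (fun a c => max a (pyDigit c)) m

theorem dmax_nil (m : Int) : dmax m [] = m := rfl

theorem dmax_cons (m : Int) (c : Char) (cs : List Char) : dmax m (c :: cs) = dmax (max m (pyDigit c)) cs := rfl

theorem dmax_pull (cs : List Char) : ∀ (a b : Int), dmax (max a b) cs = max a (dmax b cs) := by
  induction cs with
  | nil => intro a b; simp [dmax_nil]
  | cons c cs ih =>
      intro a b
      rw [dmax_cons, max_assoc, ih, dmax_cons]

theorem seed_le_dmax (cs : List Char) : ∀ (a : Int), a ≤ dmax a cs := by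
  induction cs with
  | nil => intro a; simp [dmax_nil]
  | cons c cs ih =>
      intro a
      rw [dmax_cons]
      exact le_trans (le_max_left a (pyDigit c)) (ih _)

theorem dmax_le (cs : List Char) : ∀ (a b : Int), a ≤ b → (∀ c ∈ cs, pyDigit c ≤ b) → dmax a cs ≤ b := by
  induction cs with
  | nil => intro a b hab _; simpa [dmax_nil] using hab
  | cons c cs ih =>
      intro a b hab hall
      rw [dmax_cons]
      exact ih _ _ (max_le hab (hall c (by simp))) (fun x hx => hall x (by simp [hx]))

theorem mem_le_dmax (cs : List Char) : ∀ (a : Int) (c : Char), c ∈ cs → pyDigit c ≤ dmax a cs := by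
  induction cs with
  | nil => intro a c hc; simp at hc
  | cons x cs ih =>
      intro a c hc
      rw [dmax_cons]
      rcases List.mem_cons.mp hc with h | h
      · subst h; exact le_trans (le_max_right a (pyDigit c)) (seed_le_dmax cs _)
      · exact ih _ _ h

theorem aLoop1_snd (cs : List Char) : ∀ (i p : Nat) (m : Int), (aLoop1 cs i (p, m)).2 = dmax m cs := by
  induction cs with
  | nil => intro i p m; simp [aLoop1, dmax_nil]
  | cons c cs ih =>
      intro i p m
      rw [dmax_cons]
      by_cases h : pyDigit c > m
      · rw [show aLoop1 (c :: cs) i (p, m) = aLoop1 cs (i + 1) (i, pyDigit c) by simp [aLoop1, h]]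
        rw [ih, max_eq_right (le_of_lt h)]
      · rw [show aLoop1 (c :: cs) i (p, m) = aLoop1 cs (i + 1) (p, m) by simp [aLoop1, h]]
        rw [ih, max_eq_left (le_of_not_gt h)]

theorem aLoop1_noimp (cs : List Char) : ∀ (i p : Nat) (m : Int), (∀ c ∈ cs, pyDigit c ≤ m) →
    aLoop1 cs i (p, m) = (p, m) := by
  induction cs with
  | nil => intro i p m _; simp [aLoop1]
  | cons c cs ih =>
      intro i p m hall
      have h : ¬ pyDigit c > m := not_lt.mpr (hall c (by simp))
      rw [show aLoop1 (c :: cs) i (p, m) = aLoop1 cs (i + 1) (p, m) by simp [aLoop1, h]]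
      exact ih _ _ _ (fun x hx => hall x (by simp [hx]))

theorem aLoop1_shift (cs : List Char) : ∀ (i p : Nat) (m : Int),
    aLoop1 cs (i + 1) (p + 1, m) = ((aLoop1 cs i (p, m)).1 + 1, (aLoop1 cs i (p, m)).2) := by
  induction cs with
  | nil => intro i p m; simp [aLoop1]
  | cons c cs ih =>
      intro i p m
      by_cases h : pyDigit c > m
      · rw [show aLoop1 (c :: cs) (i + 1) (p + 1, m) = aLoop1 cs (i + 1 + 1) (i + 1, pyDigit c) by simp [aLoop1, h]]
        rw [show aLoop1 (c :: cs) i (p, m) = aLoop1 cs (i + 1) (i, pyDigit c) by simp [aLoop1, h]]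
        exact ih (i + 1) i (pyDigit c)
      · rw [show aLoop1 (c :: cs) (i + 1) (p + 1, m) = aLoop1 cs (i + 1 + 1) (p + 1, m) by simp [aLoop1, h]]
        rw [show aLoop1 (c :: cs) i (p, m) = aLoop1 cs (i + 1) (p, m) by simp [aLoop1, h]]
        exact ih (i + 1) p m

theorem aLoop1_seed_irrel (cs : List Char) : ∀ (i p q : Nat) (m m' : Int),
    (∃ c ∈ cs, m < pyDigit c ∧ m' < pyDigit c) →
    (aLoop1 cs i (p, m)).1 = (aLoop1 cs i (q, m')).1 := by
  induction cs with
  | nil => intro i p q m m' hw; simp at hw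
  | cons c cs ih =>
      intro i p q m m' hw
      obtain ⟨c₀, hc₀, h1, h2⟩ := hw
      by_cases hm : pyDigit c > m <;> by_cases hm' : pyDigit c > m'
      · rw [show aLoop1 (c :: cs) i (p, m) = aLoop1 cs (i + 1) (i, pyDigit c) by simp [aLoop1, hm]]
        rw [show aLoop1 (c :: cs) i (q, m') = aLoop1 cs (i + 1) (i, pyDigit c) by simp [aLoop1, hm']]
      · -- c improved on m only; the witness must still lie in cs
        have hcs : c₀ ∈ cs := by
          rcases List.mem_cons.mp hc₀ with h | h
          · exact absurd (h ▸ h2) (by exact fun hh => hm' hh)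
          · exact h
        rw [show aLoop1 (c :: cs) i (p, m) = aLoop1 cs (i + 1) (i, pyDigit c) by simp [aLoop1, hm]]
        rw [show aLoop1 (c :: cs) i (q, m') = aLoop1 cs (i + 1) (q, m') by simp [aLoop1, hm']]
        exact ih _ _ _ _ _ ⟨c₀, hcs, lt_of_le_of_lt (le_of_not_gt hm') h2, h2⟩
      · have hcs : c₀ ∈ cs := by
          rcases List.mem_cons.mp hc₀ with h | h
          · exact absurd (h ▸ h1) (by exact fun hh => hm hh)
          · exact h
        rw [show aLoop1 (c :: cs) i (p, m) = aLoop1 cs (i + 1) (p, m) by simp [aLoop1, hm]]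
        rw [show aLoop1 (c :: cs) i (q, m') = aLoop1 cs (i + 1) (i, pyDigit c) by simp [aLoop1, hm']]
        exact ih _ _ _ _ _ ⟨c₀, hcs, h1, lt_of_le_of_lt (le_of_not_gt hm) h1⟩
      · have hcs : c₀ ∈ cs := by
          rcases List.mem_cons.mp hc₀ with h | h
          · exact absurd (h ▸ h1) (by exact fun hh => hm hh)
          · exact h
        rw [show aLoop1 (c :: cs) i (p, m) = aLoop1 cs (i + 1) (p, m) by simp [aLoop1, hm]]
        rw [show aLoop1 (c :: cs) i (q, m') = aLoop1 cs (i + 1) (q, m') by simp [aLoop1, hm']]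
        exact ih _ _ _ _ _ ⟨c₀, hcs, h1, h2⟩

theorem aLoop2_eq (cs : List Char) : ∀ (m : Int), aLoop2 cs m = dmax m cs := by
  induction cs with
  | nil => intro m; simp [aLoop2, dmax_nil]
  | cons c cs ih =>
      intro m
      rw [dmax_cons]
      by_cases h : pyDigit c > m
      · rw [show aLoop2 (c :: cs) m = aLoop2 cs (pyDigit c) by simp [aLoop2, h]]
        rw [ih, max_eq_right (le_of_lt h)]
      · rw [show aLoop2 (c :: cs) m = aLoop2 cs m by simp [aLoop2, h]]
        rw [ih, max_eq_left (le_of_not_gt h)]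

theorem aLoop1_cons_zero (c : Char) (cs : List Char) (h : 0 ≤ pyDigit c) :
    aLoop1 (c :: cs) 0 (0, 0) = aLoop1 cs 1 (0, pyDigit c) := by
  by_cases h0 : pyDigit c > 0
  · simp [aLoop1, h0]
  · have : pyDigit c = 0 := le_antisymm (le_of_not_gt h0) h
    simp [aLoop1, this]

theorem bStep_fst (st : Int × Int) (c : Char) : (bStep st c).1 = max st.1 (pyDigit c) := by
  by_cases h : pyDigit c > st.1
  · simp [bStep, h, max_eq_right (le_of_lt h)]
  · simp [bStep, h, max_eq_left (le_of_not_gt h)]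

theorem bStep_snd (st : Int × Int) (c : Char) : (bStep st c).2 = max st.2 (10 * pyDigit c + st.1) := by
  by_cases h : 10 * pyDigit c + st.1 > st.2
  · simp [bStep, h, max_eq_right (le_of_lt h)]
  · simp [bStep, h, max_eq_left (le_of_not_gt h)]

theorem bScan_cons (c : Char) (tail : List Char) (h : tail ≠ []) :
    bScan (c :: tail) = bStep (bScan tail) c := by
  obtain ⟨a, r, hr⟩ : ∃ a r, tail.reverse = a :: r := by
    rcases hrev : tail.reverse with _ | ⟨a, r⟩
    · exact absurd (by simpa using congrArg List.reverse hrev) h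
    · exact ⟨a, r, rfl⟩
  have : (c :: tail).reverse = a :: (r ++ [c]) := by
    rw [List.reverse_cons, hr]; rfl
  rw [show bScan (c :: tail) = (r ++ [c]).foldl bStep (pyDigit a, 0) by rw [bScan, this]]
  rw [show bScan tail = r.foldl bStep (pyDigit a, 0) by rw [bScan, hr]]
  rw [List.foldl_append]
  rfl

theorem bScan_fst (l : List Char) (hne : l ≠ []) (hd : ∀ c ∈ l, c.isDigit = true) :
    (bScan l).1 = dmax 0 l := by
  induction l with
  | nil => exact absurd rfl hne
  | cons c tail ih =>
      by_cases htne : tail = []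
      · have hc := (pyDigit_bounds c (hd c (by simp))).1
        subst htne
        rw [show bScan [c] = (pyDigit c, 0) by rw [bScan]; rfl]
        rw [dmax_cons, dmax_nil, max_eq_right hc]
      · rw [bScan_cons c tail htne, bStep_fst, ih htne (fun x hx => hd x (by simp [hx]))]
        rw [dmax_cons, show max (0 : Int) (pyDigit c) = max (pyDigit c) 0 by rw [max_comm], dmax_pull]
        rw [max_comm]

-- the A-side value on the char list
def coreA (l : List Char) : Int :=
  (aLoop1 (l.take (l.length - 1)) 0 (0, 0)).2 * 10 +
    aLoop2 (l.drop ((aLoop1 (l.take (l.length - 1)) 0 (0, 0)).1 + 1)) 0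

theorem main_list (l : List Char) (hd : ∀ c ∈ l, c.isDigit = true) (hlen : 2 ≤ l.length) :
    coreA l = (bScan l).2 := by
  induction l with
  | nil => simp at hlen
  | cons c0 tail ih =>
      have hd0 := pyDigit_bounds c0 (hd c0 (by simp))
      have hdtail : ∀ c ∈ tail, c.isDigit = true := fun x hx => hd x (by simp [hx])
      have htne : tail ≠ [] := by
        intro h; subst h; simp at hlen
      -- the list scanned by A's first loop on c0 :: tail
      have htake : (c0 :: tail).take ((c0 :: tail).length - 1) = c0 :: tail.take (tail.length - 1) := by
        rcases tail with _ | ⟨x, xs⟩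
        · exact absurd rfl htne
        · simp
      set middle := tail.take (tail.length - 1) with hmid
      have hmidmem : ∀ c ∈ middle, c ∈ tail := fun c hc => List.take_subset _ _ hc
      have hstart : aLoop1 ((c0 :: tail).take ((c0 :: tail).length - 1)) 0 (0, 0)
          = aLoop1 middle 1 (0, pyDigit c0) := by
        rw [htake, aLoop1_cons_zero c0 middle hd0.1]
      by_cases hcase : ∀ c ∈ middle, pyDigit c ≤ pyDigit c0
      · -- c0 dominates the scanned prefix: A = 10*d0 + max(tail)
        have hA : coreA (c0 :: tail) = pyDigit c0 * 10 + dmax 0 tail := by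
          rw [coreA, hstart, aLoop1_noimp middle 1 0 (pyDigit c0) hcase]
          simp [aLoop2_eq]
        by_cases htlen : 2 ≤ tail.length
        case neg =>
          -- base case: tail is a single char
          obtain ⟨c1, hc1⟩ : ∃ c1, tail = [c1] := by
            rcases tail with _ | ⟨c1, _ | _⟩
            · exact absurd rfl htne
            · exact ⟨c1, rfl⟩
            · simp at htlen
          have hd1 := pyDigit_bounds c1 (hdtail c1 (by simp [hc1]))
          rw [hA, bScan_cons c0 tail htne, bStep_snd]
          have hscan1 : bScan tail = (pyDigit c1, 0) := by
            rw [hc1]; rw [bScan]; rfl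
          rw [hscan1, hc1, dmax_cons, dmax_nil]
          rw [max_eq_right hd1.1]
          have h0c : (0 : Int) ≤ 10 * pyDigit c0 + pyDigit c1 := by omega
          rw [show ((pyDigit c1, 0) : Int × Int).2 = (0 : Int) by rfl,
              show ((pyDigit c1, 0) : Int × Int).1 = pyDigit c1 by rfl,
              max_eq_right h0c]
          ring
        case pos =>
          -- tail has length ≥ 2: bound B's extra candidate by the IH value
          have hIH := ih hdtail htlen
          -- A(tail) = 10 * m_t + S_t with m_t ≤ d0 and S_t ≤ dmax 0 tail
          have hmt : (aLoop1 middle 0 (0, 0)).2 = dmax 0 middle := aLoop1_snd middle 0 0 0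
          have hSt : aLoop2 (tail.drop ((aLoop1 middle 0 (0, 0)).1 + 1)) 0
              = dmax 0 (tail.drop ((aLoop1 middle 0 (0, 0)).1 + 1)) := aLoop2_eq _ 0
          have hMle : dmax 0 middle ≤ pyDigit c0 := dmax_le middle 0 (pyDigit c0) hd0.1 hcase
          have hSle : dmax 0 (tail.drop ((aLoop1 middle 0 (0, 0)).1 + 1)) ≤ dmax 0 tail :=
            dmax_le _ 0 _ (seed_le_dmax tail 0)
              (fun x hx => mem_le_dmax tail 0 x (List.drop_subset _ _ hx))
          have hAtail : coreA tail = (aLoop1 middle 0 (0, 0)).2 * 10 +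
              aLoop2 (tail.drop ((aLoop1 middle 0 (0, 0)).1 + 1)) 0 := by
            rw [coreA, hmid]
          have hcand : 10 * pyDigit c0 + dmax 0 tail ≥ (bScan tail).2 := by
            rw [← hIH, hAtail, hmt, hSt]; omega
          rw [hA, bScan_cons c0 tail htne, bStep_snd, bScan_fst tail htne hdtail]
          rw [max_eq_right hcand]
          ring
      · -- some digit in the scanned prefix beats c0: A(c0::tail) = A(tail), and B's candidate is dominated
        push Not at hcase
        obtain ⟨cw, hcw, hcwgt⟩ := hcase
        have htlen : 2 ≤ tail.length := by
          have hmne : middle ≠ [] := by intro h; rw [h] at hcw; simp at hcw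
          have : middle.length ≠ 0 := fun h => hmne (List.length_eq_zero_iff.mp h)
          rw [hmid] at this
          simp at this
          omega
        have hIH := ih hdtail htlen
        have hwb := pyDigit_bounds cw (hdtail cw (hmidmem cw hcw))
        -- m-component: seed d0 washes out
        have hm2 : (aLoop1 middle 1 (0, pyDigit c0)).2 = dmax 0 middle := by
          rw [aLoop1_snd]
          have h1 : dmax (max (pyDigit c0) 0) middle = max (pyDigit c0) (dmax 0 middle) := dmax_pull middle _ _
          rw [max_eq_left hd0.1] at h1
          rw [h1, max_eq_right (le_of_lt (lt_of_lt_of_le hcwgt (mem_le_dmax middle 0 cw hcw)))]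
        -- p-component: shifted by one
        have hp : (aLoop1 middle 1 (0, pyDigit c0)).1 = (aLoop1 middle 0 (0, 0)).1 + 1 := by
          rw [aLoop1_seed_irrel middle 1 0 1 (pyDigit c0) 0
            ⟨cw, hcw, hcwgt, lt_of_le_of_lt hd0.1 hcwgt⟩]
          rw [show (1 : Nat) = 0 + 1 by rfl, aLoop1_shift]
        have hAeq : coreA (c0 :: tail) = coreA tail := by
          rw [coreA, hstart, hm2, hp, List.drop_succ_cons]
          rw [coreA, hmid, aLoop1_snd, aLoop2_eq]
        -- B's candidate 10*d0 + max(tail) is strictly below A(tail)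
        have hmt : (aLoop1 middle 0 (0, 0)).2 = dmax 0 middle := aLoop1_snd middle 0 0 0
        have hAtail : coreA tail = (aLoop1 middle 0 (0, 0)).2 * 10 +
            aLoop2 (tail.drop ((aLoop1 middle 0 (0, 0)).1 + 1)) 0 := by
          rw [coreA, hmid]
        have hS0 : 0 ≤ aLoop2 (tail.drop ((aLoop1 middle 0 (0, 0)).1 + 1)) 0 := by
          rw [aLoop2_eq]; exact seed_le_dmax _ 0
        have hM9 : dmax 0 tail ≤ 9 := dmax_le tail 0 9 (by omega)
          (fun x hx => (pyDigit_bounds x (hdtail x hx)).2)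
        have hd0lt : pyDigit c0 + 1 ≤ dmax 0 middle :=
          le_trans (by omega : pyDigit c0 + 1 ≤ pyDigit cw) (mem_le_dmax middle 0 cw hcw)
        have hcand : 10 * pyDigit c0 + dmax 0 tail ≤ (bScan tail).2 := by
          rw [← hIH, hAtail, hmt]; omega
        rw [hAeq, hIH, bScan_cons c0 tail htne, bStep_snd, bScan_fst tail htne hdtail]
        rw [max_eq_left hcand]

theorem coreA_short (l : List Char) (h : l.length < 2) : coreA l = 0 := by
  rcases l with _ | ⟨c, _ | ⟨c2, t⟩⟩
  · rfl
  · rfl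
  · simp at h

-- ===== VERDICT (by name: the statement is the Claim_ definition above) =====
theorem calcJoltage_spec : Claim_equal_calcJoltage := by
  intro s _ hPre
  show calcJoltage s = calcJoltage_alt s
  have hA : calcJoltage s = coreA s.toList := rfl
  rw [hA, calcJoltage_alt]
  by_cases hlen : s.toList.length < 2
  · simp only [hlen, if_true]
    exact coreA_short _ hlen
  · have h2 : 2 ≤ s.toList.length := by omega
    have hdig : ∀ c ∈ s.toList, c.isDigit = true := by
      rcases hPre with h | h
      · exact absurd h hlen
      · exact fun c hc => List.all_eq_true.mp h c hc
    simp only [hlen, if_false]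
    exact main_list s.toList hdig h2
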